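-- pv_equiv track=rewrite | github.com/X-Arc-ai/brain-cli | src/brain_cli/cli.py | _looks_destructive
-- ===== SOURCE A (Python) =====
-- _DESTRUCTIVE_KEYWORDS = (
--     "DELETE", "DETACH", "SET", "CREATE", "MERGE", "REMOVE", "DROP", "ALTER",
-- )
--
-- def _looks_destructive(query_text: str) -> bool:
--     """Heuristic check: does the query contain a destructive keyword?
--
--     This is a defensive guard, not a security boundary. Treats unquoted
--     keyword tokens (whitespace-bounded) as destructive. Users determined
--     to evade this can do so trivially. Real safety comes from the LLM-facing
--     surface (the brain skill) not invoking destructive Cypher.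
--     """
--     upper = query_text.upper()
--     padded = f" {upper} "
--     for kw in _DESTRUCTIVE_KEYWORDS:
--         if f" {kw} " in padded:
--             return True
--         if upper.startswith(f"{kw} "):
--             return True
--     return False
-- ===== SOURCE B (Python) =====
-- _DESTRUCTIVE_KEYWORDS = (
--     "DELETE", "DETACH", "SET", "CREATE", "MERGE", "REMOVE", "DROP", "ALTER",
-- )
--
-- def _looks_destructive(query_text: str) -> bool:
--     """Single left-to-right scan: cut the uppercased text into runs between
--     single spaces and return True as soon as one run is a destructive keyword
--     (the trailing sentinel space flushes the last run)."""
--     token = []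
--     for ch in query_text.upper() + " ":
--         if ch == ' ':
--             if ''.join(token) in _DESTRUCTIVE_KEYWORDS:
--                 return True
--             token = []
--         else:
--             token.append(ch)
--     return False
-- ===== Notes on version B (the rewrite author's own statement) =====
-- stated objective: alternative
-- what changed: Replaces the eight repeated space-padded-keyword substring scans (plus redundant startswith checks) over the padded text by one left-to-right scan that cuts the text into space-delimited tokens and tests each token for membership in the keyword tuple, returning at the first hit.
import Mathlib
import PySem

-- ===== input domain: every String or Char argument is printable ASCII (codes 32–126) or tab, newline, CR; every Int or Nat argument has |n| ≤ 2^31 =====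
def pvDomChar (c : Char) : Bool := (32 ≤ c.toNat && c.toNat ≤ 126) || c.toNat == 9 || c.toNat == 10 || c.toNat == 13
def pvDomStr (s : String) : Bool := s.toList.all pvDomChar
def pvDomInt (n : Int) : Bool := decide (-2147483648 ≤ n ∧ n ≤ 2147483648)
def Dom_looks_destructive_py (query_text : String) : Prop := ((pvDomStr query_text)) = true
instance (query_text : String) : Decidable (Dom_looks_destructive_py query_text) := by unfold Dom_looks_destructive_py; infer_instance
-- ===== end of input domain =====

-- B replaces A's eight ' KW ' substring scans over the padded text by one left-to-right
-- tokenizing scan with a keyword-membership test per token (alternative algorithm, same result).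


-- ===== PORT A =====
def destructiveKeywords : List String :=
  ["DELETE", "DETACH", "SET", "CREATE", "MERGE", "REMOVE", "DROP", "ALTER"]

def looks_destructive_py (query_text : String) : Bool :=
  let upper := PySem.Str.upper query_text
  let padded := " " ++ upper ++ " "
  destructiveKeywords.any (fun kw =>
    PySem.Str.isIn (" " ++ kw ++ " ") padded || PySem.Str.startswith upper (kw ++ " "))

-- ===== PORT B =====
def destructiveKeywordsChars : List (List Char) := destructiveKeywords.map String.toList

def scanTokens (kws : List (List Char)) (tok : List Char) : List Char → Bool
  | [] => false
  | c :: rest =>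
    if c = ' ' then
      if kws.contains tok then true else scanTokens kws [] rest
    else
      scanTokens kws (tok ++ [c]) rest

def looks_destructive_py_alt (query_text : String) : Bool :=
  scanTokens destructiveKeywordsChars [] ((PySem.Str.upper query_text).toList ++ [' '])

-- ===== PRECONDITION & SPEC =====
def Spec_looks_destructive_py (query_text : String) (out : Bool) : Prop := out = looks_destructive_py_alt query_text
instance (query_text : String) (out : Bool) : Decidable (Spec_looks_destructive_py query_text out) := by unfold Spec_looks_destructive_py; infer_instance

-- ===== CLAIM (what is proved, stated in full; the proofs are below) =====
def Claim_equal_looks_destructive_py : Prop := ∀ (query_text : String), Dom_looks_destructive_py query_text → Spec_looks_destructive_py query_text (looks_destructive_py query_text)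

-- ===== LEMMAS AND PROOFS =====

-- the list of completed (space-terminated) tokens produced by B's scan
def pvFlush (tok : List Char) : List Char → List (List Char)
  | [] => []
  | c :: rest => if c = ' ' then tok :: pvFlush [] rest else pvFlush (tok ++ [c]) rest

-- B's early-returning scan is "some flushed token is a keyword"
theorem scanTokens_eq_flush (kws : List (List Char)) :
    ∀ (cs tok : List Char),
      scanTokens kws tok cs = (pvFlush tok cs).any (fun t => kws.contains t) := by
  intro cs
  induction cs with
  | nil => intro tok; simp [scanTokens, pvFlush]
  | cons c rest ih =>
    intro tok
    by_cases hc : c = ' '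
    · rw [scanTokens, pvFlush, if_pos hc, if_pos hc, List.any_cons, ih]
      by_cases h : kws.contains tok = true
      · rw [if_pos h]
        simp only [List.contains_eq_mem, decide_eq_true_eq] at h
        simp [h]
      · rw [if_neg h]
        simp only [List.contains_eq_mem, decide_eq_true_eq] at *
        simp [h]
    · rw [scanTokens, pvFlush, if_neg hc, if_neg hc, ih]

-- soundness: a flushed token kw occurs space-terminated at the scan position or space-bounded later
theorem mem_flush_to_match (kw : List Char) :
    ∀ (cs tok : List Char), kw ∈ pvFlush tok cs →
      (kw ++ [' ']) <+: (tok ++ cs) ∨ (' ' :: (kw ++ [' '])) <:+: cs := by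
  intro cs
  induction cs with
  | nil => intro tok h; simp [pvFlush] at h
  | cons c rest ih =>
    intro tok h
    by_cases hc : c = ' '
    · subst hc
      rw [pvFlush, if_pos rfl] at h
      rcases List.mem_cons.mp h with h | h
      · subst h
        exact Or.inl ⟨rest, by simp⟩
      · rcases ih [] h with h' | h'
        · simp only [List.nil_append] at h'
          exact Or.inr ((List.prefix_cons_inj ' ').mpr h').isInfix
        · exact Or.inr (List.infix_cons h')
    · rw [pvFlush, if_neg hc] at h
      rcases ih (tok ++ [c]) h with h' | h'
      · left; simpa using h'
      · exact Or.inr (List.infix_cons h')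

-- completeness: a space-terminated occurrence of a spaceless keyword is flushed by the scan
theorem match_to_mem_flush (kw : List Char) (hsp : ' ' ∉ kw) :
    ∀ (cs tok : List Char), ' ' ∉ tok →
      (((kw ++ [' ']) <+: (tok ++ cs) ∧ tok <+: kw) ∨ (' ' :: (kw ++ [' '])) <:+: cs) →
      kw ∈ pvFlush tok cs := by
  intro cs
  induction cs with
  | nil =>
    intro tok htok h
    rcases h with ⟨h, _⟩ | h
    · simp only [List.append_nil] at h
      exact absurd (h.mem (by simp)) htok
    · exact absurd (List.eq_nil_of_infix_nil h) (by simp)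
  | cons c rest ih =>
    intro tok htok h
    by_cases hc : c = ' '
    · subst hc
      rw [pvFlush, if_pos rfl]
      rcases h with ⟨h, htk⟩ | h
      · obtain ⟨d, hd⟩ := htk
        rcases d with _ | ⟨e, d'⟩
        · simp only [List.append_nil] at hd
          rw [hd]; exact List.mem_cons_self
        · exfalso
          have h2 : ((e :: d') ++ [' ']) <+: (' ' :: rest) :=
            (List.prefix_append_right_inj tok).mp (by simpa [← hd] using h)
          have he : e = ' ' := (List.cons_prefix_cons.mp (by simpa using h2)).1
          exact hsp (by rw [← hd, he]; simp)
      · rcases List.infix_cons_iff.mp h with h' | h'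
        · have h2 : (kw ++ [' ']) <+: rest := (List.cons_prefix_cons.mp h').2
          exact List.mem_cons_of_mem _
            (ih [] (by simp) (Or.inl ⟨by simpa using h2, List.nil_prefix⟩))
        · exact List.mem_cons_of_mem _ (ih [] (by simp) (Or.inr h'))
    · rw [pvFlush, if_neg hc]
      have htok' : ' ' ∉ tok ++ [c] := by
        simp only [List.mem_append, List.mem_singleton]
        rintro (h' | h')
        · exact htok h'
        · exact hc h'.symm
      rcases h with ⟨h, htk⟩ | h
      · obtain ⟨d, hd⟩ := htk
        rcases d with _ | ⟨e, d'⟩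
        · exfalso
          simp only [List.append_nil] at hd
          subst hd
          have h2 : ([' '] : List Char) <+: (c :: rest) :=
            (List.prefix_append_right_inj tok).mp (by simpa using h)
          exact hc (List.cons_prefix_cons.mp h2).1.symm
        · have h2 : ((e :: d') ++ [' ']) <+: (c :: rest) :=
            (List.prefix_append_right_inj tok).mp (by simpa [← hd] using h)
          have he : e = c := (List.cons_prefix_cons.mp (by simpa using h2)).1
          apply ih (tok ++ [c]) htok'
          left
          refine ⟨by simpa using h, ?_⟩
          rw [← hd, he]
          exact ⟨d', by simp⟩
      · rcases List.infix_cons_iff.mp h with h' | h'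
        · exact absurd (List.cons_prefix_cons.mp h').1.symm hc
        · exact ih (tok ++ [c]) htok' (Or.inr h')

-- A's per-keyword test (space-bounded occurrence in the padded text, or a prefix) is
-- exactly "kw is one of B's flushed tokens"
theorem key_iff (kw u : List Char) (hsp : ' ' ∉ kw) :
    ((' ' :: (kw ++ [' '])) <:+: (' ' :: (u ++ [' '])) ∨ (kw ++ [' ']) <+: u)
      ↔ kw ∈ pvFlush [] (u ++ [' ']) := by
  constructor
  · rintro (h | h)
    · rcases List.infix_cons_iff.mp h with h' | h'
      · exact match_to_mem_flush kw hsp _ [] (by simp)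
          (Or.inl ⟨by simpa using (List.cons_prefix_cons.mp h').2, List.nil_prefix⟩)
      · exact match_to_mem_flush kw hsp _ [] (by simp) (Or.inr h')
    · exact match_to_mem_flush kw hsp _ [] (by simp)
        (Or.inl ⟨by simpa using List.prefix_append_of_prefix h, List.nil_prefix⟩)
  · intro h
    rcases mem_flush_to_match kw _ [] h with h' | h'
    · simp only [List.nil_append] at h'
      exact Or.inl ((List.prefix_cons_inj ' ').mpr h').isInfix
    · exact Or.inl (List.infix_cons h')

theorem space_toList : (" " : String).toList = [' '] := rfl

theorem keywords_wf : ∀ kw ∈ destructiveKeywords, ' ' ∉ kw.toList := by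
  decide

-- ===== VERDICT (by name: the statement is the Claim_ definition above) =====
theorem looks_destructive_py_spec : Claim_equal_looks_destructive_py := by
  intro q _
  unfold Spec_looks_destructive_py looks_destructive_py looks_destructive_py_alt
  apply Bool.coe_iff_coe.mp
  rw [scanTokens_eq_flush]
  simp only [List.any_eq_true, Bool.or_eq_true, PySem.Str.isIn_eq, PySem.Str.startswith_eq,
    String.toList_append, space_toList, PySem.Chars.isIn_iff_infix, PySem.Chars.startswith_iff,
    destructiveKeywordsChars, List.contains_eq_mem, List.mem_map, decide_eq_true_eq]
  constructor
  · rintro ⟨kw, hkw, h⟩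
    have hsp := keywords_wf kw hkw
    refine ⟨kw.toList, ?_, kw, hkw, rfl⟩
    exact (key_iff kw.toList _ hsp).mp (by simpa using h)
  · rintro ⟨t, ht, kw, hkw, rfl⟩
    have hsp := keywords_wf kw hkw
    refine ⟨kw, hkw, ?_⟩
    have := (key_iff kw.toList _ hsp).mpr ht
    simpa using this
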